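-- pv_equiv track=rewrite | github.com/sparsh-sharma-08/Ravya-AI- | ncert-offline-rag/src/rag/rag_teacher.py | _sources_match
-- ===== SOURCE A (Python) =====
-- from typing import Any, Dict, List, Optional
--
-- def _sources_match(returned: List[str], retrieved_ids: List[str]) -> bool:
--     if not returned:
--         return False
--     full = set(retrieved_ids)
--     suffixes = {rid.rsplit("_", 1)[-1] for rid in retrieved_ids if "_" in rid}
--     for s in returned:
--         if not isinstance(s, str):
--             continue
--         s = s.strip()
--         if s in full or s in suffixes or any(rid.endswith(s) for rid in retrieved_ids):
--             return True
--     return False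
-- ===== SOURCE B (Python) =====
-- def _sources_match(returned, retrieved_ids):
--     # Precompute every suffix of every retrieved id once; each returned id is
--     # then answered by a single set lookup rather than a scan over all retrieved ids.
--     suffixes = set()
--     for rid in retrieved_ids:
--         for i in range(len(rid) + 1):
--             suffixes.add(rid[i:])
--     return any(s.strip() in suffixes for s in returned)
-- ===== Notes on version B (the rewrite author's own statement) =====
-- stated objective: alternative
-- what changed: B precomputes one hash set of all suffixes of the retrieved ids and answers each returned id with a single set lookup, replacing A's per-returned-id endswith scan over all retrieved ids (and its two auxiliary sets, which are subsumed by the suffix set).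
import Mathlib
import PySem

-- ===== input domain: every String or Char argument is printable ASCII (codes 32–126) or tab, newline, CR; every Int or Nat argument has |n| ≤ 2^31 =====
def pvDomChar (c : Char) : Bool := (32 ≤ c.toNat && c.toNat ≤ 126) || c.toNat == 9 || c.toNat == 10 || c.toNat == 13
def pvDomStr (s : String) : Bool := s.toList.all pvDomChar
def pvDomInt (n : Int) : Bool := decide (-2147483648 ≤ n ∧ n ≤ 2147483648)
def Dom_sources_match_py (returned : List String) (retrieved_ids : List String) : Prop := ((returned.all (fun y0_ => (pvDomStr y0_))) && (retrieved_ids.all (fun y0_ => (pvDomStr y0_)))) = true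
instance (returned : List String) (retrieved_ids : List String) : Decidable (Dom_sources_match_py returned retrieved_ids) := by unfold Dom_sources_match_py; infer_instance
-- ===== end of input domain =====

-- B replaces A's per-returned-id scan of retrieved_ids by one precomputed set of all
-- suffixes of the retrieved ids, so each returned id is a single set lookup (a different
-- algorithm of similar cost; the proved claim is exact equivalence of the return values).

-- ===== PORT A =====
-- rid.rsplit("_", 1)[-1]: the part of rid after its last '_' (used only when '_' in rid)
def pvRsplitLastA (rid : String) : String :=
  String.ofList ((rid.toList.reverse.takeWhile (fun c => c ≠ '_')).reverse)

-- the 'for s in returned' loop of A (the isinstance check is vacuous: all elements are str)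
def pvLoopA (retrieved_ids : List String) (full sufs : PySem.Set String) : List String → Bool
  | [] => false
  | s :: rest =>
    let t := PySem.Str.strip s
    if PySem.Set.contains full t || PySem.Set.contains sufs t
        || retrieved_ids.any (fun rid => PySem.Str.endswith rid t) then true
    else pvLoopA retrieved_ids full sufs rest

def sources_match_py (returned : List String) (retrieved_ids : List String) : Bool :=
  if returned = [] then false
  else
    let full := PySem.Set.ofList retrieved_ids
    let sufs := PySem.Set.ofList
      ((retrieved_ids.filter (fun rid => PySem.Str.isIn "_" rid)).map pvRsplitLastA)
    pvLoopA retrieved_ids full sufs returned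

-- ===== PORT B =====
-- the two nested 'for' loops of Source B building the suffix set
def pvAllSuffixes (retrieved_ids : List String) : PySem.Set String :=
  retrieved_ids.foldl
    (fun acc rid =>
      (PySem.List.pyRange 0 (PySem.Str.len rid + 1)).foldl
        (fun acc2 i => PySem.Set.add acc2 (PySem.Str.slice rid (some i) none)) acc)
    PySem.Set.empty

def sources_match_py_alt (returned : List String) (retrieved_ids : List String) : Bool :=
  let sufs := pvAllSuffixes retrieved_ids
  returned.any (fun s => PySem.Set.contains sufs (PySem.Str.strip s))

-- ===== PRECONDITION & SPEC =====
def Spec_sources_match_py (returned : List String) (retrieved_ids : List String) (out : Bool) : Prop := out = sources_match_py_alt returned retrieved_ids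
instance (returned : List String) (retrieved_ids : List String) (out : Bool) : Decidable (Spec_sources_match_py returned retrieved_ids out) := by unfold Spec_sources_match_py; infer_instance

-- ===== CLAIM (what is proved, stated in full; the proofs are below) =====
def Claim_equal_sources_match_py : Prop := ∀ (returned : List String) (retrieved_ids : List String), Dom_sources_match_py returned retrieved_ids → Spec_sources_match_py returned retrieved_ids (sources_match_py returned retrieved_ids)

-- ===== LEMMAS AND PROOFS =====

-- the rsplit tail is a suffix of the id it came from
theorem pvRsplitLastA_suffix (rid : String) :
    (pvRsplitLastA rid).toList <:+ rid.toList := by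
  unfold pvRsplitLastA
  rw [String.toList_ofList]
  have h : (rid.toList.reverse.takeWhile (fun c => c ≠ '_')) <+: rid.toList.reverse :=
    List.takeWhile_prefix _
  simpa using List.reverse_suffix.mpr h

-- membership in a foldl of Set.add over a mapped list
theorem mem_foldl_add {l : List Int} {f : Int → String} {acc : PySem.Set String} {s : String} :
    s ∈ l.foldl (fun a i => PySem.Set.add a (f i)) acc ↔ s ∈ acc ∨ ∃ i ∈ l, s = f i := by
  induction l generalizing acc with
  | nil => simp
  | cons x xs ih =>
    simp only [List.foldl_cons, ih, PySem.Set.mem_add, List.mem_cons]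
    constructor
    · rintro (( h | h ) | ⟨i, hi, hs⟩)
      · exact Or.inl h
      · exact Or.inr ⟨x, Or.inl rfl, h⟩
      · exact Or.inr ⟨i, Or.inr hi, hs⟩
    · rintro (h | ⟨i, (rfl | hi), hs⟩)
      · exact Or.inl (Or.inl h)
      · exact Or.inl (Or.inr hs)
      · exact Or.inr ⟨i, hi, hs⟩

-- B's set contains exactly the suffixes of the retrieved ids
theorem mem_pvAllSuffixes (ids : List String) (s : String) :
    s ∈ pvAllSuffixes ids ↔ ∃ rid ∈ ids, s.toList <:+ rid.toList := by
  unfold pvAllSuffixes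
  suffices h : ∀ (acc : PySem.Set String),
      s ∈ ids.foldl (fun acc rid =>
        (PySem.List.pyRange 0 (PySem.Str.len rid + 1)).foldl
          (fun acc2 i => PySem.Set.add acc2 (PySem.Str.slice rid (some i) none)) acc) acc
      ↔ s ∈ acc ∨ ∃ rid ∈ ids, s.toList <:+ rid.toList by
    rw [h PySem.Set.empty]
    simp [PySem.Set.empty]
  intro acc
  induction ids generalizing acc with
  | nil => simp
  | cons rid rest ih =>
    simp only [List.foldl_cons, ih, mem_foldl_add, List.mem_cons]
    have hone : (s ∈ acc ∨ ∃ i ∈ PySem.List.pyRange 0 (PySem.Str.len rid + 1), s = PySem.Str.slice rid (some i) none)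
        ↔ s ∈ acc ∨ s.toList <:+ rid.toList := by
      apply or_congr_right
      constructor
      · rintro ⟨i, hi, rfl⟩
        rw [PySem.List.mem_pyRange_one] at hi
        rw [PySem.Str.toList_slice, PySem.Chars.slice_eq_listSlice,
          PySem.List.slice_from _ hi.1]
        exact List.drop_suffix _ _
      · rintro ⟨t, ht⟩
        refine ⟨(t.length : Int), ?_, ?_⟩
        · rw [PySem.List.mem_pyRange_one]
          constructor
          · positivity
          · have : t.length + s.toList.length = rid.toList.length := by
              rw [← ht]; simp
            simp only [PySem.Str.len]
            omega
        · apply String.toList_inj.mp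
          rw [PySem.Str.toList_slice, PySem.Chars.slice_eq_listSlice,
            PySem.List.slice_from _ (by positivity)]
          rw [← ht]
          simp
    rw [hone]
    constructor
    · rintro (h | ⟨r, hr, hs⟩)
      · rcases h with h | h
        · exact Or.inl h
        · exact Or.inr ⟨rid, Or.inl rfl, h⟩
      · exact Or.inr ⟨r, Or.inr hr, hs⟩
    · rintro (h | ⟨r, (rfl | hr), hs⟩)
      · exact Or.inl (Or.inl h)
      · exact Or.inl (Or.inr hs)
      · exact Or.inr ⟨r, hr, hs⟩

-- A's three-way test collapses to "some retrieved id ends with t"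
theorem condA_eq (ids : List String) (t : String) :
    (PySem.Set.contains (PySem.Set.ofList ids) t
      || PySem.Set.contains (PySem.Set.ofList ((ids.filter (fun rid => PySem.Str.isIn "_" rid)).map pvRsplitLastA)) t
      || ids.any (fun rid => PySem.Str.endswith rid t))
    = ids.any (fun rid => PySem.Str.endswith rid t) := by
  cases hany : ids.any (fun rid => PySem.Str.endswith rid t) with
  | true => simp
  | false =>
    simp only [Bool.or_false, Bool.or_eq_false_iff]
    rw [List.any_eq_false] at hany
    constructor
    · by_contra h
      rw [Bool.not_eq_false, PySem.Set.contains_iff, PySem.Set.mem_ofList] at h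
      have := hany t h
      rw [PySem.Str.endswith_eq] at this
      exact this ((PySem.Chars.endswith_iff _ _).mpr (List.suffix_refl _))
    · by_contra h
      rw [Bool.not_eq_false, PySem.Set.contains_iff, PySem.Set.mem_ofList,
        List.mem_map] at h
      obtain ⟨rid, hmem, heq⟩ := h
      have hrid := List.mem_of_mem_filter hmem
      have := hany rid hrid
      rw [PySem.Str.endswith_eq] at this
      apply this
      rw [(PySem.Chars.endswith_iff _ _)]
      rw [← heq]
      exact pvRsplitLastA_suffix rid

-- B's lookup asks the same question
theorem condB_eq (ids : List String) (t : String) :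
    PySem.Set.contains (pvAllSuffixes ids) t = ids.any (fun rid => PySem.Str.endswith rid t) := by
  rw [Bool.eq_iff_iff, PySem.Set.contains_iff, mem_pvAllSuffixes, List.any_eq_true]
  constructor
  · rintro ⟨rid, hm, hs⟩
    exact ⟨rid, hm, by rw [PySem.Str.endswith_eq]; exact (PySem.Chars.endswith_iff _ _).mpr hs⟩
  · rintro ⟨rid, hm, hs⟩
    rw [PySem.Str.endswith_eq] at hs
    exact ⟨rid, hm, (PySem.Chars.endswith_iff _ _).mp hs⟩

theorem pvLoopA_eq_any (ids : List String) (l : List String) :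
    pvLoopA ids (PySem.Set.ofList ids)
      (PySem.Set.ofList ((ids.filter (fun rid => PySem.Str.isIn "_" rid)).map pvRsplitLastA)) l
    = l.any (fun s => ids.any (fun rid => PySem.Str.endswith rid (PySem.Str.strip s))) := by
  induction l with
  | nil => rfl
  | cons s rest ih =>
    simp only [pvLoopA, List.any_cons]
    rw [condA_eq ids (PySem.Str.strip s)]
    cases h : ids.any (fun rid => PySem.Str.endswith rid (PySem.Str.strip s)) with
    | true => simp
    | false => simp only [Bool.false_eq_true, reduceIte, Bool.false_or]; exact ih

-- ===== VERDICT (by name: the statement is the Claim_ definition above) =====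
theorem sources_match_py_spec : Claim_equal_sources_match_py := by
  intro returned retrieved_ids _
  unfold Spec_sources_match_py sources_match_py sources_match_py_alt
  rcases returned with _ | ⟨s, rest⟩
  · simp
  · simp only [if_neg (List.cons_ne_nil s rest)]
    rw [pvLoopA_eq_any]
    apply (PySem.List.any_congr_mem _).symm
    intro x _
    exact condB_eq retrieved_ids (PySem.Str.strip x)
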